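-- pv_equiv track=rewrite | github.com/Quadriphobs1/python | hangman/hangman.py | match_with_gaps
-- ===== SOURCE A (Python) =====
-- def match_with_gaps(my_word, other_word):
--     '''
--     my_word: string with _ characters, current guess of secret word
--     other_word: string, regular English word
--     returns: boolean, True if all the actual letters of my_word match the
--         corresponding letters of other_word, or the letter is the special symbol
--         _ , and my_word and other_word are of the same length;
--         False otherwise:
--     '''
--     my_word = my_word.strip().replace(" ", "")
--     other_word = other_word.strip().replace(" ", "")
--     if len(my_word) != len(other_word):
--         return False
--
--     my_word = list(my_word)
--     other_word = list(other_word)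
--
--     idx = 0
--
--     for letter in my_word:
--         if letter != '_':
--             if my_word.count(letter) != other_word.count(letter):
--                 return False
--
--             if letter != other_word[idx]:
--                 return False
--         idx += 1
--     return True
-- ===== SOURCE B (Python) =====
-- def match_with_gaps(my_word, other_word):
--     my_word = my_word.strip().replace(" ", "")
--     other_word = other_word.strip().replace(" ", "")
--     if len(my_word) != len(other_word):
--         return False
--     revealed = {c for c in my_word if c != '_'}
--     for m, o in zip(my_word, other_word):
--         if m == '_':
--             if o in revealed:
--                 return False
--         elif m != o:
--             return False
--     return True
-- ===== Notes on version B (the rewrite author's own statement) =====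
-- stated objective: faster
-- what changed: Replaces A's per-position count-equality scans (list.count over both full words inside the loop) with a revealed-letter set built once and a single zipped pass doing a positional check or a set-membership test.
import Mathlib
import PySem

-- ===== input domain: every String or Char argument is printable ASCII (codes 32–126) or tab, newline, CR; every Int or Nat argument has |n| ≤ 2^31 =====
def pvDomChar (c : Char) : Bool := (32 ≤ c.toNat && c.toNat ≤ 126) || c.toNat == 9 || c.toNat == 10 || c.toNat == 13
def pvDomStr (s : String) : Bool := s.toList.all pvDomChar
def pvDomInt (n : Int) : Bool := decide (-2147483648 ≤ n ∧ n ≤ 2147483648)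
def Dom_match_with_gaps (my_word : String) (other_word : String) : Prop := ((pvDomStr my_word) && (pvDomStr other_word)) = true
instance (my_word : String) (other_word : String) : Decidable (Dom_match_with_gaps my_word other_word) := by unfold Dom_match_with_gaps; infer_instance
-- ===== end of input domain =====

-- B builds the set of revealed letters once and does a single zipped pass (membership test at gaps),
-- replacing A's per-position count-equality scans; objective: faster (asymptotic, O(n^2) -> O(n)).


-- ===== PORT A =====
-- A's for-loop: walks the letters of my_word with an index; for each non-'_' letter it compares
-- the counts in both (full) words and the letter against other_word[idx].
def loopA (full other : List Char) : List Char → Nat → Bool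
  | [], _ => true
  | letter :: rest, idx =>
    if letter ≠ '_' then
      if full.count letter ≠ other.count letter then false
      else
        match PySem.List.pyGet? other (idx : Int) with
        | none => false   -- IndexError: unreachable, idx < length (lengths were checked equal)
        | some o => if letter ≠ o then false else loopA full other rest (idx + 1)
    else loopA full other rest (idx + 1)

def match_with_gaps (my_word : String) (other_word : String) : Bool :=
  let mw := (PySem.Str.replace (PySem.Str.strip my_word) " " "").toList
  let ow := (PySem.Str.replace (PySem.Str.strip other_word) " " "").toList
  if mw.length ≠ ow.length then false
  else loopA mw ow mw 0

-- ===== PORT B =====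
-- B's single pass over zip(my_word, other_word): gap position => other letter must not be revealed;
-- revealed position => letters must agree.
def loopB (revealed : PySem.Set Char) : List Char → List Char → Bool
  | [], _ => true
  | _ :: _, [] => true
  | m :: ms, o :: os =>
    if m = '_' then
      if PySem.Set.contains revealed o then false else loopB revealed ms os
    else if m ≠ o then false else loopB revealed ms os

def match_with_gaps_alt (my_word : String) (other_word : String) : Bool :=
  let mw := (PySem.Str.replace (PySem.Str.strip my_word) " " "").toList
  let ow := (PySem.Str.replace (PySem.Str.strip other_word) " " "").toList
  if mw.length ≠ ow.length then false
  else
    let revealed := PySem.Set.ofList (mw.filter (fun c => c ≠ '_'))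
    loopB revealed mw ow

-- ===== PRECONDITION & SPEC =====
def Spec_match_with_gaps (my_word : String) (other_word : String) (out : Bool) : Prop := out = match_with_gaps_alt my_word other_word
instance (my_word : String) (other_word : String) (out : Bool) : Decidable (Spec_match_with_gaps my_word other_word out) := by unfold Spec_match_with_gaps; infer_instance

-- ===== CLAIM (what is proved, stated in full; the proofs are below) =====
def Claim_equal_match_with_gaps : Prop := ∀ (my_word : String) (other_word : String), Dom_match_with_gaps my_word other_word → Spec_match_with_gaps my_word other_word (match_with_gaps my_word other_word)

-- ===== LEMMAS AND PROOFS =====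

-- Characterization of A's loop as a ∀ over the remaining positions.
theorem loopA_char (full other : List Char) (rest : List Char) (idx : Nat) :
    loopA full other rest idx = true ↔
      ∀ k (hk : k < rest.length), rest[k] ≠ '_' →
        full.count rest[k] = other.count rest[k] ∧
          PySem.List.pyGet? other ((idx + k : Nat) : Int) = some rest[k] := by
  induction rest generalizing idx with
  | nil => simp [loopA]
  | cons letter rest ih =>
    by_cases hl : letter = '_'
    · subst hl
      simp only [loopA]
      rw [if_neg (show ¬('_' : Char) ≠ '_' from fun h => h rfl), ih]
      constructor
      · intro h k hk hne
        cases k with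
        | zero => simp at hne
        | succ k =>
          simp only [List.getElem_cons_succ] at hne ⊢
          have e : idx + (k + 1) = (idx + 1) + k := by omega
          rw [e]
          exact h k (by simpa using hk) hne
      · intro h k hk hne
        have := h (k + 1) (by simpa using hk) (by simpa using hne)
        simp only [List.getElem_cons_succ] at this
        have e : idx + (k + 1) = (idx + 1) + k := by omega
        rw [e] at this
        exact this
    · simp only [loopA]
      rw [if_pos hl]
      by_cases hc : full.count letter = other.count letter
      · rw [if_neg (show ¬full.count letter ≠ other.count letter from fun h => h hc)]
        cases hg : PySem.List.pyGet? other ((idx : Nat) : Int) with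
        | none =>
          change (false : Bool) = true ↔ _
          constructor
          · intro h; exact absurd h (by simp)
          · intro h
            have := (h 0 (by simp) (by simpa using hl)).2
            rw [show ((idx + 0 : Nat) : Int) = ((idx : Nat) : Int) by simp] at this
            simp only [List.getElem_cons_zero] at this
            rw [hg] at this; exact absurd this (by simp)
        | some o =>
          change (if letter ≠ o then false else loopA full other rest (idx + 1)) = true ↔ _
          by_cases ho : letter = o
          · subst ho
            rw [if_neg (show ¬letter ≠ letter from fun h => h rfl), ih]
            constructor
            · intro h k hk hne
              cases k with
              | zero =>
                simp only [List.getElem_cons_zero]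
                refine ⟨hc, ?_⟩
                rw [show ((idx + 0 : Nat) : Int) = ((idx : Nat) : Int) by simp, hg]
              | succ k =>
                simp only [List.getElem_cons_succ] at hne ⊢
                have e : idx + (k + 1) = (idx + 1) + k := by omega
                rw [e]
                exact h k (by simpa using hk) hne
            · intro h k hk hne
              have := h (k + 1) (by simpa using hk) (by simpa using hne)
              simp only [List.getElem_cons_succ] at this
              have e : idx + (k + 1) = (idx + 1) + k := by omega
              rw [e] at this
              exact this
          · rw [if_pos (show letter ≠ o from ho)]
            constructor
            · intro h; exact absurd h (by simp)
            · intro h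
              have := (h 0 (by simp) (by simpa using hl)).2
              rw [show ((idx + 0 : Nat) : Int) = ((idx : Nat) : Int) by simp] at this
              simp only [List.getElem_cons_zero] at this
              rw [hg] at this
              exact absurd (Option.some.inj this).symm ho
      · rw [if_pos (show full.count letter ≠ other.count letter from hc)]
        constructor
        · intro h; exact absurd h (by simp)
        · intro h
          have := (h 0 (by simp) (by simpa using hl)).1
          simp only [List.getElem_cons_zero] at this
          exact absurd this hc

-- Characterization of B's loop as a ∀ over the zipped positions.
theorem loopB_char (revealed : PySem.Set Char) (ms os : List Char) :
    loopB revealed ms os = true ↔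
      ∀ k (hk : k < ms.length) (hk2 : k < os.length),
        (ms[k] = '_' → PySem.Set.contains revealed os[k] = false) ∧
          (ms[k] ≠ '_' → ms[k] = os[k]) := by
  induction ms generalizing os with
  | nil => simp [loopB]
  | cons m ms ih =>
    cases os with
    | nil => simp [loopB]
    | cons o os =>
      by_cases hm : m = '_'
      · subst hm
        simp only [loopB, if_true]
        by_cases hc : PySem.Set.contains revealed o = true
        · rw [if_pos hc]
          constructor
          · intro h; exact absurd h (by simp)
          · intro h
            have := (h 0 (by simp) (by simp)).1 (by simp)
            simp only [List.getElem_cons_zero] at this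
            rw [hc] at this; cases this
        · rw [if_neg hc, ih]
          constructor
          · intro h k hk hk2
            cases k with
            | zero =>
              simp only [List.getElem_cons_zero]
              exact ⟨fun _ => Bool.eq_false_iff.mpr hc, fun hne => absurd rfl hne⟩
            | succ k => simpa using h k (by simpa using hk) (by simpa using hk2)
          · intro h k hk hk2
            simpa using h (k + 1) (by simpa using hk) (by simpa using hk2)
      · simp only [loopB]
        rw [if_neg hm]
        by_cases heq : m = o
        · subst heq
          rw [if_neg (show ¬m ≠ m from fun h => h rfl), ih]
          constructor
          · intro h k hk hk2
            cases k with
            | zero => simp [hm]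
            | succ k => simpa using h k (by simpa using hk) (by simpa using hk2)
          · intro h k hk hk2
            simpa using h (k + 1) (by simpa using hk) (by simpa using hk2)
        · rw [if_pos (show m ≠ o from heq)]
          constructor
          · intro h; exact absurd h (by simp)
          · intro h
            have := (h 0 (by simp) (by simp)).2 hm
            simp only [List.getElem_cons_zero] at this
            exact absurd this heq

-- Counting lemmas (parallel induction over two equal-length lists).
theorem count_le_of_pointwise (a b : List Char) (c : Char) (hlen : a.length = b.length)
    (h : ∀ k (hk : k < a.length) (hk2 : k < b.length), a[k] = c → b[k] = c) :
    a.count c ≤ b.count c := by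
  induction a generalizing b with
  | nil => simp
  | cons x a ih =>
    cases b with
    | nil => simp at hlen
    | cons y b =>
      have hx : x = c → y = c := fun hc => by simpa using h 0 (by simp) (by simp) (by simpa using hc)
      have ht := ih b (by simpa using hlen)
        (fun k hk hk2 hc => by simpa using h (k + 1) (by simpa using hk) (by simpa using hk2) (by simpa using hc))
      by_cases hxc : x = c
      · rw [List.count_cons, List.count_cons, if_pos (by simpa using hxc),
          if_pos (by simpa using hx hxc)]
        omega
      · rw [List.count_cons, List.count_cons, if_neg (by simpa using hxc)]
        split <;> omega

theorem count_lt_of_pointwise (a b : List Char) (c : Char) (hlen : a.length = b.length)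
    (h : ∀ k (hk : k < a.length) (hk2 : k < b.length), a[k] = c → b[k] = c)
    (j : Nat) (hj : j < a.length) (hj2 : j < b.length) (hja : a[j] ≠ c) (hjb : b[j] = c) :
    a.count c < b.count c := by
  induction a generalizing b j with
  | nil => simp at hj
  | cons x a ih =>
    cases b with
    | nil => simp at hlen
    | cons y b =>
      have hx : x = c → y = c := fun hc => by simpa using h 0 (by simp) (by simp) (by simpa using hc)
      have hpt : ∀ k (hk : k < a.length) (hk2 : k < b.length), a[k] = c → b[k] = c :=
        fun k hk hk2 hc => by simpa using h (k + 1) (by simpa using hk) (by simpa using hk2) (by simpa using hc)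
      cases j with
      | zero =>
        simp only [List.getElem_cons_zero] at hja hjb
        have ht := count_le_of_pointwise a b c (by simpa using hlen) hpt
        rw [List.count_cons, List.count_cons, if_neg (by simpa using hja), if_pos (by simpa using hjb)]
        omega
      | succ j =>
        have ht := ih b (by simpa using hlen) hpt j (by simpa using hj) (by simpa using hj2)
          (by simpa using hja) (by simpa using hjb)
        rw [List.count_cons, List.count_cons]
        by_cases hxc : x = c
        · rw [if_pos (by simpa using hxc), if_pos (by simpa using hx hxc)]; omega
        · rw [if_neg (by simpa using hxc)]; split <;> omega

theorem count_eq_of_pointwise (a b : List Char) (c : Char) (hlen : a.length = b.length)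
    (h : ∀ k (hk : k < a.length) (hk2 : k < b.length), a[k] = c ↔ b[k] = c) :
    a.count c = b.count c :=
  Nat.le_antisymm
    (count_le_of_pointwise a b c hlen (fun k hk hk2 hc => (h k hk hk2).mp hc))
    (count_le_of_pointwise b a c hlen.symm (fun k hk hk2 hc => (h k hk2 hk).mpr hc))

-- The heart of the equivalence: on equal-length words, A's loop condition and B's loop
-- condition (with revealed = the set of non-'_' letters of a) are the same predicate.
theorem loops_agree (a b : List Char) (hlen : a.length = b.length) :
    loopA a b a 0 = loopB (PySem.Set.ofList (a.filter (fun c => c ≠ '_'))) a b := by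
  have hmem : ∀ x : Char,
      PySem.Set.contains (PySem.Set.ofList (a.filter (fun c => c ≠ '_'))) x = true ↔ (x ∈ a ∧ x ≠ '_') := by
    intro x
    rw [PySem.Set.contains_iff, PySem.Set.mem_ofList]
    simp [List.mem_filter]
  rw [Bool.eq_iff_iff, loopA_char, loopB_char]
  constructor
  · -- A-side ⇒ B-side
    intro h k hk hk2
    have hpos : ∀ j (hj : j < a.length) (hj2 : j < b.length), a[j] ≠ '_' → a[j] = b[j] := by
      intro j hj hj2 hne
      have := (h j hj hne).2
      rw [show ((0 + j : Nat) : Int) = ((j : Nat) : Int) by simp,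
        PySem.List.pyGet?_natCast, List.getElem?_eq_getElem hj2] at this
      exact (Option.some.inj this).symm
    refine ⟨fun hgap => ?_, fun hne => hpos k hk hk2 hne⟩
    by_contra hcon
    rw [Bool.not_eq_false, hmem] at hcon
    obtain ⟨hbmem, hbne⟩ := hcon
    obtain ⟨j, hj, hja⟩ := List.getElem_of_mem hbmem
    have hjne : a[j] ≠ '_' := by rw [hja]; exact hbne
    have hcnt := (h j hj hjne).1
    rw [hja] at hcnt
    have hlt := count_lt_of_pointwise a b (b[k]) hlen
      (fun i hi hi2 hic => by
        have hine : a[i] ≠ '_' := by rw [hic]; exact hbne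
        exact (hpos i hi hi2 hine).symm.trans hic)
      k hk hk2 (by rw [hgap]; exact fun hh => hbne hh.symm) rfl
    omega
  · -- B-side ⇒ A-side
    intro h k hk hne
    have hk2 : k < b.length := hlen ▸ hk
    have hpos : ∀ j (hj : j < a.length) (hj2 : j < b.length), a[j] ≠ '_' → a[j] = b[j] :=
      fun j hj hj2 hne => (h j hj hj2).2 hne
    refine ⟨?_, ?_⟩
    · apply count_eq_of_pointwise a b (a[k]) hlen
      intro i hi hi2
      constructor
      · intro hic
        have hine : a[i] ≠ '_' := by rw [hic]; exact hne
        exact (hpos i hi hi2 hine).symm.trans hic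
      · intro hbc
        by_cases hgap : a[i] = '_'
        · exfalso
          have hcf := (h i hi hi2).1 hgap
          have : PySem.Set.contains (PySem.Set.ofList (a.filter (fun c => c ≠ '_'))) (b[i]) = true :=
            (hmem _).mpr ⟨hbc ▸ List.getElem_mem hk, hbc ▸ hne⟩
          rw [hcf] at this; cases this
        · rw [hpos i hi hi2 hgap, hbc]
    · rw [show ((0 + k : Nat) : Int) = ((k : Nat) : Int) by simp,
        PySem.List.pyGet?_natCast, List.getElem?_eq_getElem hk2, hpos k hk hk2 hne]

-- ===== VERDICT (by name: the statement is the Claim_ definition above) =====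
theorem match_with_gaps_spec : Claim_equal_match_with_gaps := by
  intro my_word other_word _
  unfold Spec_match_with_gaps match_with_gaps match_with_gaps_alt
  set mw := (PySem.Str.replace (PySem.Str.strip my_word) " " "").toList with hmw
  set ow := (PySem.Str.replace (PySem.Str.strip other_word) " " "").toList with how
  by_cases hlen : mw.length = ow.length
  · rw [if_neg (show ¬mw.length ≠ ow.length from fun h => h hlen),
      if_neg (show ¬mw.length ≠ ow.length from fun h => h hlen)]
    exact loops_agree mw ow hlen
  · rw [if_pos hlen, if_pos hlen]
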